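-- pv_equiv track=rewrite | github.com/fireflyframework/fireflyframework-rule-engine | python-runtime/firefly_runtime/json_utils.py | _parse_path_segments
-- ===== SOURCE A (Python) =====
-- from typing import Any, Dict, List, Optional, Union
--
-- def _parse_path_segments(path: str) -> List[str]:
--     """Parse path into segments, handling array indices."""
--     segments = []
--     current = ""
--     in_brackets = False
--
--     for char in path:
--         if char == '[':
--             if current:
--                 segments.append(current)
--                 current = ""
--             in_brackets = True
--             current += char
--         elif char == ']':
--             current += char
--             segments.append(current)
--             current = ""
--             in_brackets = False
--         elif char == '.' and not in_brackets:
--             if current: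
--                 segments.append(current)
--                 current = ""
--         else:
--             current += char
--
--     if current:
--         segments.append(current)
--
--     return segments
-- ===== SOURCE B (Python) =====
-- def _parse_path_segments(path: str) -> list:
--     """Parse path into segments, handling array indices."""
--     segments = []
--     chunks = path.split(']')
--     for i, chunk in enumerate(chunks):
--         head, *bracketed = chunk.split('[')
--         *closed, open_ = head.split('.')
--         parts = [p for p in closed if p]
--         if bracketed:
--             if open_:
--                 parts.append(open_)
--             parts += ['[' + b for b in bracketed[:-1]]
--             open_ = '[' + bracketed[-1]
--         if i + 1 < len(chunks):
--             parts.append(open_ + ']')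
--         elif open_:
--             parts.append(open_)
--         segments += parts
--     return segments
-- ===== Notes on version B (the rewrite author's own statement) =====
-- stated objective: faster
-- what changed: Replaces the character-by-character state machine (segments/current/in_brackets accumulator) with a three-level split decomposition: split the path on closing brackets into chunks, split each chunk on opening brackets into a head and bracket groups, dot-split the head, and re-attach the closing bracket to the piece it closes.
import Mathlib
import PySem

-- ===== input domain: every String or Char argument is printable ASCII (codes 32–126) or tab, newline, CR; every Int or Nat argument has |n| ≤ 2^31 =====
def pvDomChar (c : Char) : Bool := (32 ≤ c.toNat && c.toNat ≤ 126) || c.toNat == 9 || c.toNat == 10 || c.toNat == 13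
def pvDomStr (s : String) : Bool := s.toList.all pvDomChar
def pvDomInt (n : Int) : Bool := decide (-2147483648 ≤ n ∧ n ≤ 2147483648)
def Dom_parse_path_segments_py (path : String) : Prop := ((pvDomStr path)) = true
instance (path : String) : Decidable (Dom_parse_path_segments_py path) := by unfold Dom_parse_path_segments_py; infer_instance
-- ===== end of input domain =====

-- B replaces A's per-character state machine by a split-based decomposition (bulk str.split on
-- closing brackets, then opening brackets, then dots): constant-factor faster, equal on every input.

-- ===== PORT A =====
-- A's loop: foldl over the characters with state (segments, current, in_brackets);
-- strings are represented as List Char and joined with String.ofList at the end (exact for any characters).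
def pvStepA (st : List (List Char) × List Char × Bool) (char : Char) :
    List (List Char) × List Char × Bool :=
  let (segments, current, in_brackets) := st
  if char = '[' then
    ((if current ≠ [] then segments ++ [current] else segments), ['['], true)
  else if char = ']' then
    (segments ++ [current ++ [']']], [], false)
  else if char = '.' ∧ ¬ in_brackets then
    ((if current ≠ [] then segments ++ [current] else segments), [], in_brackets)
  else
    (segments, current ++ [char], in_brackets)

def parse_path_segments_py (path : String) : List String :=
  let st := path.toList.foldl pvStepA ([], [], false)
  let segments := if st.2.1 ≠ [] then st.1 ++ [st.2.1] else st.1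
  segments.map String.ofList

-- ===== PORT B =====
-- pvSplit sep cs = Python's str.split with a one-character separator (exact: n separators give
-- n+1 pieces, empty pieces kept).
def pvSplit (sep : Char) : List Char → List (List Char)
  | [] => [[]]
  | c :: r =>
    if c = sep then [] :: pvSplit sep r
    else (c :: (pvSplit sep r).headI) :: (pvSplit sep r).tail

-- One iteration of B's loop body: `head, *bracketed = chunk.split('[')`,
-- `*closed, open_ = head.split('.')`, the bracket-group tokens, and the final
-- `']'` re-attachment (isLast = whether this chunk is the last one, i.e. not followed by ']').
def pvChunkParts (chunk : List Char) (isLast : Bool) : List (List Char) :=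
  let pieces := pvSplit '[' chunk
  let head := pieces.headI
  let bracketed := pieces.tail
  let dots := pvSplit '.' head
  let closed := dots.dropLast
  let open0 := dots.getLastD []
  let parts0 := closed.filter (· ≠ [])
  let parts1 :=
    if bracketed ≠ [] then
      parts0 ++ (if open0 ≠ [] then [open0] else []) ++ bracketed.dropLast.map (fun b => '[' :: b)
    else parts0
  let open1 := if bracketed ≠ [] then '[' :: bracketed.getLastD [] else open0
  if isLast = false then parts1 ++ [open1 ++ [']']]
  else if open1 ≠ [] then parts1 ++ [open1] else parts1

-- B's `for i, chunk in enumerate(chunks)` with the `i + 1 < len(chunks)` test.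
def pvGo : List (List Char) → List (List Char)
  | [] => []
  | [chunk] => pvChunkParts chunk true
  | chunk :: rest => pvChunkParts chunk false ++ pvGo rest

def parse_path_segments_py_alt (path : String) : List String :=
  (pvGo (pvSplit ']' path.toList)).map String.ofList

-- ===== PRECONDITION & SPEC =====
def Spec_parse_path_segments_py (path : String) (out : List String) : Prop := out = parse_path_segments_py_alt path
instance (path : String) (out : List String) : Decidable (Spec_parse_path_segments_py path out) := by unfold Spec_parse_path_segments_py; infer_instance

-- ===== CLAIM (what is proved, stated in full; the proofs are below) =====
def Claim_equal_parse_path_segments_py : Prop := ∀ (path : String), Dom_parse_path_segments_py path → Spec_parse_path_segments_py path (parse_path_segments_py path)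

-- ===== LEMMAS AND PROOFS =====

-- A's loop rewritten tail-first: pvLoopA cs cur inb = the segments A still emits from state (cur, inb).
def pvLoopA : List Char → List Char → Bool → List (List Char)
  | [], cur, _ => if cur ≠ [] then [cur] else []
  | c :: rest, cur, inb =>
    if c = '[' then
      (if cur ≠ [] then [cur] else []) ++ pvLoopA rest ['['] true
    else if c = ']' then
      (cur ++ [']']) :: pvLoopA rest [] false
    else if c = '.' ∧ ¬ inb then
      (if cur ≠ [] then [cur] else []) ++ pvLoopA rest [] inb
    else
      pvLoopA rest (cur ++ [c]) inb

-- A's foldl with accumulated segments equals the already-emitted segments plus pvLoopA.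
theorem pvFoldA_loopA (cs : List Char) : ∀ (segs : List (List Char)) (cur : List Char) (inb : Bool),
    (let st := cs.foldl pvStepA (segs, cur, inb)
     if st.2.1 ≠ [] then st.1 ++ [st.2.1] else st.1) = segs ++ pvLoopA cs cur inb := by
  induction cs with
  | nil => intro segs cur inb; simp only [List.foldl_nil, pvLoopA]; split <;> simp
  | cons c rest ih =>
    intro segs cur inb
    simp only [List.foldl_cons, pvLoopA, pvStepA]
    by_cases h1 : c = '['
    · by_cases hc : cur = [] <;> simp [h1, hc, ih]
    · by_cases h2 : c = ']'
      · simp [h2, ih]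
      · by_cases h3 : c = '.'
        · by_cases hi : inb
          · simp [h3, hi, ih]
          · by_cases hc : cur = [] <;> simp [h3, hi, hc, ih]
        · simp [h1, h2, h3, ih]

-- Basic facts about pvSplit.
theorem pvSplit_nil (sep : Char) : pvSplit sep [] = [[]] := rfl

theorem pvSplit_ne_nil (sep : Char) (xs : List Char) : pvSplit sep xs ≠ [] := by
  cases xs with
  | nil => simp [pvSplit]
  | cons c r => by_cases hc : c = sep <;> simp [pvSplit, hc]

theorem pvSplit_shape (sep : Char) (xs : List Char) : ∃ h t, pvSplit sep xs = h :: t := by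
  cases hx : pvSplit sep xs with
  | nil => exact absurd hx (pvSplit_ne_nil sep xs)
  | cons a t => exact ⟨a, t, rfl⟩

theorem pvSplit_sep (sep : Char) (r : List Char) : pvSplit sep (sep :: r) = [] :: pvSplit sep r := by
  simp [pvSplit]

theorem pvSplit_other (sep c : Char) (hc : c ≠ sep) (r : List Char) :
    pvSplit sep (c :: r) = (c :: (pvSplit sep r).headI) :: (pvSplit sep r).tail := by
  simp [pvSplit, hc]

-- Prepending separator-free text extends the first piece.
theorem pvSplit_append (sep : Char) (cur xs : List Char) (h : ∀ c ∈ cur, c ≠ sep) :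
    pvSplit sep (cur ++ xs) = (cur ++ (pvSplit sep xs).headI) :: (pvSplit sep xs).tail := by
  induction cur with
  | nil =>
    obtain ⟨a, t, hx⟩ := pvSplit_shape sep xs
    simp [hx]
  | cons c cur ih =>
    have hc : c ≠ sep := h c (by simp)
    simp only [List.cons_append, pvSplit, if_neg hc]
    rw [ih (fun d hd => h d (by simp [hd]))]
    simp

theorem pvSplit_no_sep (sep : Char) (cur : List Char) (h : ∀ c ∈ cur, c ≠ sep) :
    pvSplit sep cur = [cur] := by
  simpa [pvSplit] using pvSplit_append sep cur [] h

-- pvGo on a cons.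
theorem pvGo_cons (a : List Char) (t : List (List Char)) :
    pvGo (a :: t) = if t = [] then pvChunkParts a true
      else pvChunkParts a false ++ pvGo t := by
  cases t <;> simp [pvGo]

-- pvChunkParts on a chunk with no special characters at all (A's plain dot-run).
theorem pvChunkParts_plain (cur : List Char) (h : ∀ c ∈ cur, c ≠ '.' ∧ c ≠ '[' ∧ c ≠ ']') (b : Bool) :
    pvChunkParts cur b = if b then (if cur ≠ [] then [cur] else []) else [cur ++ [']']] := by
  have h1 : pvSplit '[' cur = [cur] := pvSplit_no_sep _ _ (fun c hc => (h c hc).2.1)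
  have h2 : pvSplit '.' cur = [cur] := pvSplit_no_sep _ _ (fun c hc => (h c hc).1)
  cases b <;> simp [pvChunkParts, h1, h2]

-- pvChunkParts on a chunk that is one bracket group (A's in-bracket state).
theorem pvChunkParts_brk (body : List Char) (h : ∀ c ∈ body, c ≠ '[' ∧ c ≠ ']') (b : Bool) :
    pvChunkParts ('[' :: body) b =
      if b then [('[' :: body)] else [('[' :: body) ++ [']']] := by
  have h1 : pvSplit '[' ('[' :: body) = [[], body] := by
    rw [pvSplit_sep, pvSplit_no_sep _ _ (fun c hc => (h c hc).1)]
  cases b <;> simp [pvChunkParts, h1, pvSplit_nil]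

-- A '.' flush inside the head: the plain run before it becomes its own (possibly dropped) piece.
theorem pvChunkParts_dot (cur : List Char) (hcur : ∀ c ∈ cur, c ≠ '.' ∧ c ≠ '[' ∧ c ≠ ']')
    (h : List Char) (b : Bool) :
    pvChunkParts (cur ++ '.' :: h) b =
      (if cur ≠ [] then [cur] else []) ++ pvChunkParts h b := by
  obtain ⟨pH, pT, hp⟩ := pvSplit_shape '[' h
  obtain ⟨q, qT, hq⟩ := pvSplit_shape '.' pH
  have h1 : pvSplit '[' (cur ++ '.' :: h) = (cur ++ '.' :: pH) :: pT := by
    rw [pvSplit_append '[' cur ('.' :: h) (fun c hc => (hcur c hc).2.1)]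
    rw [pvSplit_other '[' '.' (by decide) h, hp]
    simp
  have h2 : pvSplit '.' (cur ++ '.' :: pH) = cur :: q :: qT := by
    rw [pvSplit_append '.' cur ('.' :: pH) (fun c hc => (hcur c hc).1)]
    rw [pvSplit_sep, hq]
    simp
  simp only [List.nil_append] at h1 h2 ⊢
  by_cases hc : cur = []
  · subst hc
    simp only [List.nil_append] at h1 h2 ⊢
    cases b <;> by_cases hT : pT = [] <;>
      simp [pvChunkParts, h1, h2, hp, hq, List.getLastD_cons, hT]
  · cases b <;> by_cases hT : pT = [] <;>
      simp [pvChunkParts, h1, h2, hp, hq, List.getLastD_cons, hc, hT] <;>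
      (try split_ifs <;> simp)

-- A '[' after a plain run: the run becomes its own (possibly dropped) piece.
theorem pvChunkParts_lbrk_run (cur : List Char) (hcur : ∀ c ∈ cur, c ≠ '.' ∧ c ≠ '[' ∧ c ≠ ']')
    (h : List Char) (b : Bool) :
    pvChunkParts (cur ++ '[' :: h) b =
      (if cur ≠ [] then [cur] else []) ++ pvChunkParts ('[' :: h) b := by
  obtain ⟨pH, pT, hp⟩ := pvSplit_shape '[' h
  have h2 : pvSplit '[' ('[' :: h) = [] :: pH :: pT := by rw [pvSplit_sep, hp]
  have h1 : pvSplit '[' (cur ++ '[' :: h) = cur :: pH :: pT := by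
    rw [pvSplit_append '[' cur ('[' :: h) (fun c hc => (hcur c hc).2.1)]
    rw [h2]
    simp
  have h3 : pvSplit '.' cur = [cur] := pvSplit_no_sep _ _ (fun c hc => (hcur c hc).1)
  by_cases hc : cur = []
  · subst hc
    simp only [List.nil_append] at h1 ⊢
    cases b <;> by_cases hT : pT = [] <;>
      simp [pvChunkParts, h1, h2, pvSplit_nil, List.getLastD_cons, hT]
  · cases b <;> by_cases hT : pT = [] <;>
      simp [pvChunkParts, h1, h2, h3, pvSplit_nil, List.getLastD_cons, hc, hT]

-- A '[' inside a bracket group: the open group is emitted as it stands.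
theorem pvChunkParts_lbrk_brk (body : List Char) (hbody : ∀ c ∈ body, c ≠ '[' ∧ c ≠ ']')
    (h : List Char) (b : Bool) :
    pvChunkParts ('[' :: (body ++ '[' :: h)) b =
      ('[' :: body) :: pvChunkParts ('[' :: h) b := by
  obtain ⟨pH, pT, hp⟩ := pvSplit_shape '[' h
  have h2 : pvSplit '[' ('[' :: h) = [] :: pH :: pT := by rw [pvSplit_sep, hp]
  have h1 : pvSplit '[' ('[' :: (body ++ '[' :: h)) = [] :: body :: pH :: pT := by
    rw [pvSplit_sep, pvSplit_append '[' body ('[' :: h) (fun c hc => (hbody c hc).1)]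
    rw [h2]
    simp
  cases b <;> by_cases hT : pT = [] <;>
    simp [pvChunkParts, h1, h2, pvSplit_nil, List.getLastD_cons, hT]

-- Chunk-level steps lifted to pvGo over the ']'-split of the whole remaining input.
theorem pvGo_rbrk_run (cur t : List Char) (hcur : ∀ c ∈ cur, c ≠ '.' ∧ c ≠ '[' ∧ c ≠ ']') :
    pvGo (pvSplit ']' (cur ++ ']' :: t)) = (cur ++ [']']) :: pvGo (pvSplit ']' t) := by
  obtain ⟨h, tt, ht⟩ := pvSplit_shape ']' t
  have h1 : pvSplit ']' (cur ++ ']' :: t) = cur :: h :: tt := by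
    rw [pvSplit_append ']' cur (']' :: t) (fun c hc => (hcur c hc).2.2)]
    rw [pvSplit_sep, ht]
    simp
  rw [h1, ht, pvGo_cons]
  simp [pvChunkParts_plain cur hcur false]

theorem pvGo_rbrk_brk (body t : List Char) (hbody : ∀ c ∈ body, c ≠ '[' ∧ c ≠ ']') :
    pvGo (pvSplit ']' ('[' :: body ++ ']' :: t)) =
      (('[' :: body) ++ [']']) :: pvGo (pvSplit ']' t) := by
  obtain ⟨h, tt, ht⟩ := pvSplit_shape ']' t
  have h1 : pvSplit ']' ('[' :: body ++ ']' :: t) = ('[' :: body) :: h :: tt := by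
    rw [pvSplit_append ']' ('[' :: body) (']' :: t)
      (by intro c hc; rcases List.mem_cons.mp hc with h' | h'
          · subst h'; decide
          · exact (hbody c h').2)]
    rw [pvSplit_sep, ht]
    simp
  rw [h1, ht, pvGo_cons]
  simp [pvChunkParts_brk body hbody false]

theorem pvGo_dot (cur t : List Char) (hcur : ∀ c ∈ cur, c ≠ '.' ∧ c ≠ '[' ∧ c ≠ ']') :
    pvGo (pvSplit ']' (cur ++ '.' :: t)) =
      (if cur ≠ [] then [cur] else []) ++ pvGo (pvSplit ']' t) := by
  obtain ⟨h, tt, ht⟩ := pvSplit_shape ']' t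
  have h1 : pvSplit ']' (cur ++ '.' :: t) = (cur ++ '.' :: h) :: tt := by
    rw [pvSplit_append ']' cur ('.' :: t) (fun c hc => (hcur c hc).2.2)]
    rw [pvSplit_other ']' '.' (by decide) t, ht]
    simp
  rw [h1, ht, pvGo_cons, pvGo_cons]
  cases tt with
  | nil => simp [pvChunkParts_dot cur hcur h]
  | cons a b => simp [pvChunkParts_dot cur hcur h]

theorem pvGo_lbrk_run (cur t : List Char) (hcur : ∀ c ∈ cur, c ≠ '.' ∧ c ≠ '[' ∧ c ≠ ']') :
    pvGo (pvSplit ']' (cur ++ '[' :: t)) =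
      (if cur ≠ [] then [cur] else []) ++ pvGo (pvSplit ']' ('[' :: t)) := by
  obtain ⟨h, tt, ht⟩ := pvSplit_shape ']' t
  have h0 : pvSplit ']' ('[' :: t) = ('[' :: h) :: tt := by
    rw [pvSplit_other ']' '[' (by decide) t, ht]
    simp
  have h1 : pvSplit ']' (cur ++ '[' :: t) = (cur ++ '[' :: h) :: tt := by
    rw [pvSplit_append ']' cur ('[' :: t) (fun c hc => (hcur c hc).2.2)]
    simp [h0]
  rw [h1, h0, pvGo_cons, pvGo_cons]
  cases tt with
  | nil => simp [pvChunkParts_lbrk_run cur hcur h]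
  | cons a b => simp [pvChunkParts_lbrk_run cur hcur h]

theorem pvGo_lbrk_brk (body t : List Char) (hbody : ∀ c ∈ body, c ≠ '[' ∧ c ≠ ']') :
    pvGo (pvSplit ']' ('[' :: body ++ '[' :: t)) =
      ('[' :: body) :: pvGo (pvSplit ']' ('[' :: t)) := by
  obtain ⟨h, tt, ht⟩ := pvSplit_shape ']' t
  have h0 : pvSplit ']' ('[' :: t) = ('[' :: h) :: tt := by
    rw [pvSplit_other ']' '[' (by decide) t, ht]
    simp
  have h1 : pvSplit ']' ('[' :: body ++ '[' :: t) = ('[' :: (body ++ '[' :: h)) :: tt := by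
    rw [pvSplit_append ']' ('[' :: body) ('[' :: t)
      (by intro c hc; rcases List.mem_cons.mp hc with h' | h'
          · subst h'; decide
          · exact (hbody c h').2)]
    simp [h0]
  rw [h1, h0, pvGo_cons, pvGo_cons]
  cases tt with
  | nil => simp [pvChunkParts_lbrk_brk body hbody h]
  | cons a b => simp [pvChunkParts_lbrk_brk body hbody h]

-- Main invariant: A's remaining output from each of its loop states equals B's chunk
-- processing of the current piece prepended to the remaining input.
theorem pvMainB (cs : List Char) :
    (∀ cur, (∀ c ∈ cur, c ≠ '.' ∧ c ≠ '[' ∧ c ≠ ']') →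
      pvLoopA cs cur false = pvGo (pvSplit ']' (cur ++ cs))) ∧
    (∀ body, (∀ c ∈ body, c ≠ '[' ∧ c ≠ ']') →
      pvLoopA cs ('[' :: body) true = pvGo (pvSplit ']' ('[' :: body ++ cs))) := by
  induction cs with
  | nil =>
    constructor
    · intro cur hcur
      have h1 : pvSplit ']' cur = [cur] := pvSplit_no_sep _ _ (fun c hc => (hcur c hc).2.2)
      simp only [List.append_nil, h1, pvGo]
      rw [pvChunkParts_plain cur hcur true]
      simp [pvLoopA]
    · intro body hbody
      have h1 : pvSplit ']' ('[' :: body) = ['[' :: body] :=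
        pvSplit_no_sep _ _ (by
          intro c hc; rcases List.mem_cons.mp hc with h | h
          · subst h; decide
          · exact (hbody c h).2)
      simp only [List.append_nil, h1, pvGo]
      rw [pvChunkParts_brk body hbody true]
      simp [pvLoopA]
  | cons c rest ih =>
    obtain ⟨ihRun, ihBrk⟩ := ih
    constructor
    · intro cur hcur
      by_cases h1 : c = '['
      · subst h1
        rw [pvGo_lbrk_run cur rest hcur]
        have := ihBrk [] (by simp)
        simp only [List.nil_append] at this
        simp [pvLoopA, this]
      · by_cases h2 : c = ']'
        · subst h2
          rw [pvGo_rbrk_run cur rest hcur]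
          have := ihRun [] (by simp)
          simp only [List.nil_append] at this
          simp [pvLoopA, this]
        · by_cases h3 : c = '.'
          · subst h3
            rw [pvGo_dot cur rest hcur]
            have := ihRun [] (by simp)
            simp only [List.nil_append] at this
            simp [pvLoopA, h1, h2, this]
          · have hstep : pvLoopA (c :: rest) cur false = pvLoopA rest (cur ++ [c]) false := by
              simp [pvLoopA, h1, h2, h3]
            have := ihRun (cur ++ [c]) (by
              intro d hd; rcases List.mem_append.mp hd with h | h
              · exact hcur d h
              · simp at h; subst h; exact ⟨h3, h1, h2⟩)
            rw [hstep, this]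
            simp
    · intro body hbody
      by_cases h1 : c = '['
      · subst h1
        rw [pvGo_lbrk_brk body rest hbody]
        have := ihBrk [] (by simp)
        simp only [List.nil_append] at this
        simp [pvLoopA, this]
      · by_cases h2 : c = ']'
        · subst h2
          rw [pvGo_rbrk_brk body rest hbody]
          have := ihRun [] (by simp)
          simp only [List.nil_append] at this
          simp [pvLoopA, this]
        · have hstep : pvLoopA (c :: rest) ('[' :: body) true
              = pvLoopA rest ('[' :: body ++ [c]) true := by
            simp [pvLoopA, h1, h2]
          have := ihBrk (body ++ [c]) (by
            intro d hd; rcases List.mem_append.mp hd with h | h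
            · exact hbody d h
            · simp at h; subst h; exact ⟨h1, h2⟩)
          rw [hstep]
          simp only [List.cons_append, List.append_assoc] at this ⊢
          rw [this]
          simp

-- ===== VERDICT (by name: the statement is the Claim_ definition above) =====
theorem parse_path_segments_py_spec : Claim_equal_parse_path_segments_py := by
  intro path _
  unfold Spec_parse_path_segments_py parse_path_segments_py parse_path_segments_py_alt
  simp only []
  rw [pvFoldA_loopA path.toList [] [] false]
  have := (pvMainB path.toList).1 [] (by simp)
  simp only [List.nil_append] at this
  rw [this]
  simp
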